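-- pv_equiv track=rewrite | github.com/EzhangHZ/CSE256-final-analysis-study | outputs/run_2024_06_06_11:15:46/pre2021-9/solution_codes/394_solution.py | count_valid_pair_combinations
-- ===== SOURCE A (Python) =====
-- from collections import defaultdict
--
-- def count_valid_pair_combinations(boys, girls, pairs):
--     boy_counts = defaultdict(int)
--     girl_counts = defaultdict(int)
--     for i in range(len(pairs)):
--         boy_counts[pairs[i][0]] += 1
--         girl_counts[pairs[i][1]] += 1
--
--     total_combinations = 0
--     for i in range(len(pairs)):
--         total_combinations += len(pairs) - boy_counts[pairs[i][0]] - girl_counts[pairs[i][1]] + 1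
--
--     return total_combinations // 2
-- ===== SOURCE B (Python) =====
-- from collections import defaultdict
--
-- def count_valid_pair_combinations(boys, girls, pairs):
--     n = len(pairs)
--     boy_counts = defaultdict(int)
--     girl_counts = defaultdict(int)
--     for b, g in pairs:
--         boy_counts[b] += 1
--         girl_counts[g] += 1
--     total = n * n + n
--     total -= sum(c * c for c in boy_counts.values())
--     total -= sum(c * c for c in girl_counts.values())
--     return total // 2
-- ===== Notes on version B (the rewrite author's own statement) =====
-- stated objective: alternative
-- what changed: The second pass over all pairs is replaced by a closed form: total = n*n + n minus the sums of squared multiplicities read off the two count maps (one term per distinct boy/girl instead of one per pair), using sum over pairs of bc[b] = sum of bc[b]^2 over distinct boys.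
import Mathlib
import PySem

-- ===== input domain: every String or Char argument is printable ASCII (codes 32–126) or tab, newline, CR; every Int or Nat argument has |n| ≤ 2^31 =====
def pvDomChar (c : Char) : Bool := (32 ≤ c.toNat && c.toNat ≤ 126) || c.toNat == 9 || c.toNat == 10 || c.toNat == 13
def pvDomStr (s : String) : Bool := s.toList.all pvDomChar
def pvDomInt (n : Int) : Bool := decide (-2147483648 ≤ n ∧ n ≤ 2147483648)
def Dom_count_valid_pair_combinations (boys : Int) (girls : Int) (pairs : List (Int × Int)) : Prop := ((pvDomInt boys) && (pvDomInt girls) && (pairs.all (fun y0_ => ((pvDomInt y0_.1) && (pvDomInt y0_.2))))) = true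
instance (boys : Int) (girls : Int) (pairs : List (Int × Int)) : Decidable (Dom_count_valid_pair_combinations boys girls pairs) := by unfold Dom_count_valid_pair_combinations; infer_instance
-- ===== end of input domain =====

-- B replaces A's second pass over all pairs by a closed form over the count maps:
-- total = n*n + n - Σ c² (boy counts) - Σ c² (girl counts); objective: alternative decomposition (one pass over pairs plus a pass over distinct keys).



-- ===== PORT A =====
def count_valid_pair_combinations (boys : Int) (girls : Int) (pairs : List (Int × Int)) : Int :=
  -- first loop: build both defaultdicts in one pass over range(len(pairs))
  let counts :=
    (PySem.List.pyRange 0 (PySem.List.len pairs)).foldl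
      (fun (s : PySem.Dict Int Int × PySem.Dict Int Int) i =>
        (s.1.modify (PySem.List.pyGetD pairs i (0, 0)).1 0 (· + 1),
         s.2.modify (PySem.List.pyGetD pairs i (0, 0)).2 0 (· + 1)))
      (PySem.Dict.empty, PySem.Dict.empty)
  let boy_counts := counts.1
  let girl_counts := counts.2
  -- second loop: total_combinations
  let total_combinations :=
    (PySem.List.pyRange 0 (PySem.List.len pairs)).foldl
      (fun acc i =>
        acc + (PySem.List.len pairs
               - boy_counts.getD (PySem.List.pyGetD pairs i (0, 0)).1 0
               - girl_counts.getD (PySem.List.pyGetD pairs i (0, 0)).2 0 + 1))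
      0
  PySem.Int.floordiv total_combinations 2

-- ===== PORT B =====
def count_valid_pair_combinations_alt (boys : Int) (girls : Int) (pairs : List (Int × Int)) : Int :=
  let n : Int := PySem.List.len pairs
  let boy_counts := pairs.foldl (fun (d : PySem.Dict Int Int) p => d.modify p.1 0 (· + 1)) PySem.Dict.empty
  let girl_counts := pairs.foldl (fun (d : PySem.Dict Int Int) p => d.modify p.2 0 (· + 1)) PySem.Dict.empty
  let total := n * n + n
  let total := total - (boy_counts.values.map (fun c => c * c)).sum
  let total := total - (girl_counts.values.map (fun c => c * c)).sum
  PySem.Int.floordiv total 2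

-- ===== PRECONDITION & SPEC =====
def Spec_count_valid_pair_combinations (boys : Int) (girls : Int) (pairs : List (Int × Int)) (out : Int) : Prop := out = count_valid_pair_combinations_alt boys girls pairs
instance (boys : Int) (girls : Int) (pairs : List (Int × Int)) (out : Int) : Decidable (Spec_count_valid_pair_combinations boys girls pairs out) := by unfold Spec_count_valid_pair_combinations; infer_instance

-- ===== CLAIM (what is proved, stated in full; the proofs are below) =====
def Claim_equal_count_valid_pair_combinations : Prop := ∀ (boys : Int) (girls : Int) (pairs : List (Int × Int)), Dom_count_valid_pair_combinations boys girls pairs → Spec_count_valid_pair_combinations boys girls pairs (count_valid_pair_combinations boys girls pairs)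

-- ===== LEMMAS AND PROOFS =====

-- A's first loop (over range(len(pairs)) with indexing) builds exactly the two Counters
lemma pv_firstloop (pairs : List (Int × Int)) :
    (PySem.List.pyRange 0 (PySem.List.len pairs)).foldl
      (fun (s : PySem.Dict Int Int × PySem.Dict Int Int) i =>
        (s.1.modify (PySem.List.pyGetD pairs i (0, 0)).1 0 (· + 1),
         s.2.modify (PySem.List.pyGetD pairs i (0, 0)).2 0 (· + 1)))
      (PySem.Dict.empty, PySem.Dict.empty)
    = (PySem.Dict.counter (pairs.map (·.1)), PySem.Dict.counter (pairs.map (·.2))) := by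
  have h := PySem.List.foldl_pyRange_pyGetD pairs ((0:Int), (0:Int))
      (fun (s : PySem.Dict Int Int × PySem.Dict Int Int) p =>
        (s.1.modify p.1 0 (· + 1), s.2.modify p.2 0 (· + 1)))
      (PySem.Dict.empty, PySem.Dict.empty) (le_refl 0)
  simp only [Int.toNat_zero, List.drop_zero] at h
  rw [h]
  have h2 := PySem.List.foldl_prod_mk
      (f := fun (d : PySem.Dict Int Int) (p : Int × Int) => PySem.Dict.modify d p.1 0 (· + 1))
      (g := fun (d : PySem.Dict Int Int) (p : Int × Int) => PySem.Dict.modify d p.2 0 (· + 1))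
      pairs PySem.Dict.empty PySem.Dict.empty
  rw [h2]
  simp only [Prod.mk.injEq]
  exact ⟨by rw [PySem.Dict.counter_eq_foldl, List.foldl_map],
         by rw [PySem.Dict.counter_eq_foldl, List.foldl_map]⟩

-- A's second loop is the sum, over the pairs, of (n - bc[b] - gc[g] + 1)
lemma pv_secondloop (pairs : List (Int × Int)) (bc gc : PySem.Dict Int Int) :
    (PySem.List.pyRange 0 (PySem.List.len pairs)).foldl
      (fun acc i =>
        acc + (PySem.List.len pairs
               - bc.getD (PySem.List.pyGetD pairs i (0, 0)).1 0
               - gc.getD (PySem.List.pyGetD pairs i (0, 0)).2 0 + 1)) 0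
    = (pairs.map (fun p => PySem.List.len pairs - bc.getD p.1 0 - gc.getD p.2 0 + 1)).sum := by
  have h := PySem.List.foldl_pyRange_pyGetD pairs ((0:Int), (0:Int))
      (fun (acc : Int) p =>
        acc + (PySem.List.len pairs - bc.getD p.1 0 - gc.getD p.2 0 + 1))
      0 (le_refl 0)
  simp only [Int.toNat_zero, List.drop_zero] at h
  rw [h, PySem.List.foldl_add, zero_add]

-- sum of (counter l)[x] over x in l  =  sum of c*c over the Counter's values
lemma pv_sum_counter (l : List Int) :
    (l.map (fun x => (PySem.Dict.counter l).getD x 0)).sum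
      = ((PySem.Dict.counter l).values.map (fun c => c * c)).sum := by
  have hv : (PySem.Dict.counter l).values
      = (PySem.Set.ofList l).map (fun k => ((List.count k l : Int))) := by
    show (PySem.Dict.counter l).items.map (·.2) = _
    rw [PySem.Dict.items_counter, List.map_map]
    rfl
  rw [hv, List.map_map]
  have hfin : (PySem.Set.ofList l).toFinset = l.toFinset := by
    apply Finset.ext; intro x
    simp [List.mem_toFinset, PySem.Set.mem_ofList]
  rw [← List.sum_toFinset _ (PySem.Set.nodup_ofList l), hfin]
  have hl : (l.map (fun x => (PySem.Dict.counter l).getD x 0)).sum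
      = (l.map (fun x => (List.count x l : Int))).sum := by
    simp [PySem.Dict.getD_counter]
  rw [hl, Finset.sum_list_map_count]
  apply Finset.sum_congr rfl
  intro m _
  simp [Function.comp]

-- splitting the per-pair sum of A's second loop
lemma pv_sum_split (pairs : List (Int × Int)) (n : Int) (f g : Int → Int) :
    (pairs.map (fun p => n - f p.1 - g p.2 + 1)).sum
      = (n + 1) * pairs.length
        - (pairs.map (fun p => f p.1)).sum - (pairs.map (fun p => g p.2)).sum := by
  induction pairs with
  | nil => simp
  | cons p t ih =>
      simp only [List.map_cons, List.sum_cons, ih, List.length_cons]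
      push_cast
      ring

-- ===== VERDICT (by name: the statement is the Claim_ definition above) =====
theorem count_valid_pair_combinations_spec : Claim_equal_count_valid_pair_combinations := by
  intro boys girls pairs _
  show count_valid_pair_combinations boys girls pairs = _
  unfold count_valid_pair_combinations count_valid_pair_combinations_alt
  simp only [pv_firstloop, pv_secondloop]
  rw [pv_sum_split pairs (PySem.List.len pairs)
        (fun x => (PySem.Dict.counter (pairs.map (·.1))).getD x 0)
        (fun x => (PySem.Dict.counter (pairs.map (·.2))).getD x 0)]
  have hb : (pairs.map (fun p => (PySem.Dict.counter (pairs.map (·.1))).getD p.1 0)).sum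
      = ((PySem.Dict.counter (pairs.map (·.1))).values.map (fun c => c * c)).sum := by
    rw [← pv_sum_counter (pairs.map (·.1))]
    rw [List.map_map]
    rfl
  have hg : (pairs.map (fun p => (PySem.Dict.counter (pairs.map (·.2))).getD p.2 0)).sum
      = ((PySem.Dict.counter (pairs.map (·.2))).values.map (fun c => c * c)).sum := by
    rw [← pv_sum_counter (pairs.map (·.2))]
    rw [List.map_map]
    rfl
  rw [hb, hg]
  have hcb : pairs.foldl (fun (d : PySem.Dict Int Int) p => d.modify p.1 0 (· + 1)) PySem.Dict.empty
      = PySem.Dict.counter (pairs.map (·.1)) := by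
    rw [PySem.Dict.counter_eq_foldl, List.foldl_map]
  have hcg : pairs.foldl (fun (d : PySem.Dict Int Int) p => d.modify p.2 0 (· + 1)) PySem.Dict.empty
      = PySem.Dict.counter (pairs.map (·.2)) := by
    rw [PySem.Dict.counter_eq_foldl, List.foldl_map]
  rw [hcb, hcg]
  have hn : PySem.List.len pairs = (pairs.length : Int) := rfl
  rw [hn]
  congr 1
  ring
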